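-- pv_equiv track=rewrite | github.com/sterrant/laughing-succotash | cpm_lander_agent.py | _split_complete_lines
-- ===== SOURCE A (Python) =====
-- from typing import Dict, List, Optional
--
-- def _split_complete_lines(buf: str) -> List[str]:
--     """Returns list including trailing remainder (possibly incomplete)."""
--     out: List[str] = []
--     start = 0
--     for i, ch in enumerate(buf):
--         if ch == "\n" or ch == "\r":
--             out.append(buf[start : i + 1])
--             start = i + 1
--     out.append(buf[start:])
--     return out
-- ===== SOURCE B (Python) =====
-- from typing import List
--
--
-- def _split_complete_lines(buf: str) -> List[str]:
--     """Returns list including trailing remainder (possibly incomplete)."""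
--     # Pass 1: tokenize into an odd-length list alternating text chunks and
--     # single-character delimiter tokens (like re.split(r'([\r\n])', buf)).
--     parts: List[str] = []
--     cur = ""
--     for ch in buf:
--         if ch == "\r" or ch == "\n":
--             parts.append(cur)
--             parts.append(ch)
--             cur = ""
--         else:
--             cur += ch
--     parts.append(cur)
--     # Pass 2: merge each text chunk with its delimiter; the last chunk is the
--     # trailing remainder.
--     out: List[str] = []
--     i = 0
--     while i + 1 < len(parts):
--         out.append(parts[i] + parts[i + 1])
--         i += 2
--     out.append(parts[-1])
--     return out
-- ===== Notes on version B (the rewrite author's own statement) =====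
-- stated objective: alternative
-- what changed: Replaces A's index-tracking scan with string slicing by a tokenize-then-merge pipeline: a first pass builds an odd-length alternating list of text chunks and single delimiter tokens (the shape of re.split(r'([\r\n])', buf)), and a second pass concatenates each chunk with its delimiter, the last chunk being the remainder.
import Mathlib
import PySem

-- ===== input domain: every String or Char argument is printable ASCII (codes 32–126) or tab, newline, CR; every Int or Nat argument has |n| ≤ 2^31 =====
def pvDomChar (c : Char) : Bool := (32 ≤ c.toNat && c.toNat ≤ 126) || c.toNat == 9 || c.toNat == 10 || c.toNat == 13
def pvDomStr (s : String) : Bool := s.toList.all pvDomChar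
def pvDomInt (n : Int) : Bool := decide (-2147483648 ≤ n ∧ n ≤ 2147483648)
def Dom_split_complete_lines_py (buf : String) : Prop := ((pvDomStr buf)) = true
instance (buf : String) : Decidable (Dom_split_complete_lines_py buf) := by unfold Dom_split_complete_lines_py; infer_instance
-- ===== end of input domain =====

-- B replaces A's index-tracking scan-and-slice with a tokenize-then-merge pipeline
-- (alternating text/delimiter tokens, then pairwise concatenation); objective: alternative.

-- ===== PORT A =====
-- A's loop body: on a delimiter, append buf[start:i+1] and set start = i+1.
def pvAStep (cs : List Char) (st : List (List Char) × Int) (p : Int × Char) :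
    List (List Char) × Int :=
  if p.2 = '\n' ∨ p.2 = '\r' then
    (st.1 ++ [PySem.List.slice cs (some st.2) (some (p.1 + 1))], p.1 + 1)
  else st

def split_complete_lines_py (buf : String) : List String :=
  let cs := buf.toList
  let st := (PySem.List.enumerate cs 0).foldl (pvAStep cs) ([], 0)
  (st.1 ++ [PySem.List.slice cs (some st.2) none]).map String.ofList

-- ===== PORT B =====
-- B's tokenizer loop body: state = (parts so far, current text chunk).
def pvTokenStep (st : List (List Char) × List Char) (ch : Char) :
    List (List Char) × List Char :=
  if ch = '\r' ∨ ch = '\n' then (st.1 ++ [st.2, [ch]], []) else (st.1, st.2 ++ [ch])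

def pvTokens (cs : List Char) : List (List Char) :=
  let st := cs.foldl pvTokenStep ([], [])
  st.1 ++ [st.2]

-- B's merge loop: concatenate each text chunk with its delimiter; last chunk stays.
def pvPair : List (List Char) → List (List Char)
  | [] => []
  | [x] => [x]
  | x :: d :: rest => (x ++ d) :: pvPair rest

def split_complete_lines_py_alt (buf : String) : List String :=
  (pvPair (pvTokens buf.toList)).map String.ofList

-- ===== PRECONDITION & SPEC =====
def Spec_split_complete_lines_py (buf : String) (out : List String) : Prop := out = split_complete_lines_py_alt buf
instance (buf : String) (out : List String) : Decidable (Spec_split_complete_lines_py buf out) := by unfold Spec_split_complete_lines_py; infer_instance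

-- ===== CLAIM (what is proved, stated in full; the proofs are below) =====
def Claim_equal_split_complete_lines_py : Prop := ∀ (buf : String), Dom_split_complete_lines_py buf → Spec_split_complete_lines_py buf (split_complete_lines_py buf)

-- ===== LEMMAS AND PROOFS =====

-- A common characterisation: the list of lines (each keeping its delimiter) plus remainder.
def pvSpec : List Char → List (List Char)
  | [] => [[]]
  | c :: rest =>
    if c = '\n' ∨ c = '\r' then [c] :: pvSpec rest
    else
      match pvSpec rest with
      | [] => [[c]]
      | l :: ls => (c :: l) :: ls

theorem pvSpec_ne_nil (cs : List Char) : pvSpec cs ≠ [] := by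
  cases cs with
  | nil => simp [pvSpec]
  | cons c rest =>
    simp only [pvSpec]
    split
    · simp
    · cases h : pvSpec rest <;> simp

theorem pvSpec_cons_headI_tail (cs : List Char) :
    (pvSpec cs).headI :: (pvSpec cs).tail = pvSpec cs := by
  cases h : pvSpec cs with
  | nil => exact absurd h (pvSpec_ne_nil cs)
  | cons l ls => simp

-- ----- A equals pvSpec -----
theorem pvA_aux (full : List Char) :
    ∀ (rest : List Char) (s start : Nat) (out : List (List Char)),
      full.drop s = rest → start ≤ s →
      (let st := (PySem.List.enumerate rest (s : Int)).foldl (pvAStep full) (out, (start : Int));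
        st.1 ++ [PySem.List.slice full (some st.2) none])
      = out ++ (((full.drop start).take (s - start) ++ (pvSpec rest).headI)
                 :: (pvSpec rest).tail) := by
  intro rest
  induction rest with
  | nil =>
    intro s start out hdrop hle
    simp only [PySem.List.enumerate_nil, List.foldl_nil]
    rw [PySem.List.slice_from_natCast]
    have hlen : full.length ≤ s := by
      have := congrArg List.length hdrop
      simp at this; omega
    have htake : (full.drop start).take (s - start) = full.drop start := by
      apply List.take_of_length_le
      simp; omega
    simp [pvSpec, htake]
  | cons c rest ih =>
    intro s start out hdrop hle
    have hget : full[s]? = some c := by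
      have : (full.drop s)[0]? = some c := by rw [hdrop]; rfl
      simpa using this
    have hdrop' : full.drop (s + 1) = rest := by
      rw [← List.tail_drop, hdrop]; rfl
    have hseg : (full.drop start).take (s + 1 - start) =
        (full.drop start).take (s - start) ++ [c] := by
      have h1 : s + 1 - start = (s - start) + 1 := by omega
      rw [h1, List.take_add_one]
      have : (full.drop start)[s - start]? = some c := by
        rw [List.getElem?_drop]
        have : start + (s - start) = s := by omega
        rw [this]; exact hget
      simp [this]
    rw [PySem.List.enumerate_cons]
    simp only [List.foldl_cons]
    by_cases hc : c = '\n' ∨ c = '\r'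
    · have hstep : pvAStep full (out, (start : Int)) ((s : Int), c) =
          (out ++ [PySem.List.slice full (some (start : Int)) (some ((s : Int) + 1))],
           (s : Int) + 1) := by
        simp [pvAStep, hc]
      rw [hstep]
      have hcast : ((s : Int) + 1) = ((s + 1 : Nat) : Int) := by push_cast; ring
      rw [hcast, ih (s + 1) (s + 1) _ hdrop' (le_refl _)]
      rw [PySem.List.slice_natCast]
      simp only [pvSpec, hc, if_pos]
      rw [hseg]
      have : (s + 1) - (s + 1) = 0 := by omega
      rw [this]
      simp only [List.take_zero, List.nil_append, List.append_assoc]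
      rw [pvSpec_cons_headI_tail]
      simp only [List.headI_cons, List.tail_cons, List.cons_append, List.nil_append]
    · have hstep : pvAStep full (out, (start : Int)) ((s : Int), c) = (out, (start : Int)) := by
        simp [pvAStep, hc]
      rw [hstep]
      have hcast : ((s : Int) + 1) = ((s + 1 : Nat) : Int) := by push_cast; ring
      rw [hcast, ih (s + 1) start out hdrop' (by omega)]
      simp only [pvSpec, hc, if_neg, not_false_iff]
      cases h : pvSpec rest with
      | nil => exact absurd h (pvSpec_ne_nil rest)
      | cons l ls => simp [hseg]

theorem pvA_eq_spec (cs : List Char) :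
    (let st := (PySem.List.enumerate cs 0).foldl (pvAStep cs) ([], 0);
      st.1 ++ [PySem.List.slice cs (some st.2) none]) = pvSpec cs := by
  have h := pvA_aux cs cs 0 0 [] (by simp) (le_refl _)
  simpa [pvSpec_cons_headI_tail] using h

-- ----- B equals pvSpec -----
theorem pvTok_pref (cs : List Char) :
    ∀ (done : List (List Char)) (cur : List Char),
      cs.foldl pvTokenStep (done, cur)
      = (done ++ (cs.foldl pvTokenStep ([], cur)).1, (cs.foldl pvTokenStep ([], cur)).2) := by
  induction cs with
  | nil => intro done cur; simp
  | cons c cs ih =>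
    intro done cur
    simp only [List.foldl_cons]
    by_cases hc : c = '\r' ∨ c = '\n'
    · simp only [pvTokenStep, hc, if_pos, List.nil_append]
      rw [ih (done ++ [cur, [c]]) [], ih [cur, [c]] []]
      simp
    · simp only [pvTokenStep, hc, if_neg, not_false_iff]
      exact ih done (cur ++ [c])

theorem pvB_aux (cs : List Char) :
    ∀ (cur : List Char),
      pvPair ((cs.foldl pvTokenStep ([], cur)).1 ++ [(cs.foldl pvTokenStep ([], cur)).2])
      = (cur ++ (pvSpec cs).headI) :: (pvSpec cs).tail := by
  induction cs with
  | nil => intro cur; simp [pvPair, pvSpec]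
  | cons c cs ih =>
    intro cur
    simp only [List.foldl_cons]
    by_cases hc : c = '\r' ∨ c = '\n'
    · have hc' : c = '\n' ∨ c = '\r' := hc.symm
      simp only [pvTokenStep, hc, if_pos, List.nil_append]
      rw [pvTok_pref cs [cur, [c]] []]
      have : ([cur, [c]] ++ (cs.foldl pvTokenStep ([], [])).1)
          ++ [(cs.foldl pvTokenStep ([], [])).2]
          = cur :: [c] :: ((cs.foldl pvTokenStep ([], [])).1
              ++ [(cs.foldl pvTokenStep ([], [])).2]) := by simp
      rw [this]
      simp only [pvPair]
      rw [ih []]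
      simp only [List.nil_append, pvSpec_cons_headI_tail]
      simp [pvSpec, hc']
    · have hc' : ¬ (c = '\n' ∨ c = '\r') := fun h => hc h.symm
      simp only [pvTokenStep, hc, if_neg, not_false_iff]
      rw [ih (cur ++ [c])]
      simp only [pvSpec, hc', if_neg, not_false_iff]
      cases h : pvSpec cs with
      | nil => exact absurd h (pvSpec_ne_nil cs)
      | cons l ls => simp

theorem pvB_eq_spec (cs : List Char) : pvPair (pvTokens cs) = pvSpec cs := by
  have h := pvB_aux cs []
  simpa [pvTokens, pvSpec_cons_headI_tail] using h

-- ===== VERDICT (by name: the statement is the Claim_ definition above) =====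
theorem split_complete_lines_py_spec : Claim_equal_split_complete_lines_py := by
  intro buf _
  unfold Spec_split_complete_lines_py split_complete_lines_py split_complete_lines_py_alt
  rw [pvB_eq_spec]
  simpa using congrArg (List.map String.ofList) (pvA_eq_spec buf.toList)
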